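-- pv_equiv track=rewrite | github.com/MrBrantCode/unitest_baseline | mut_generate/mist_train_cf/cf_13427/solution.py | replace_zeros
-- ===== SOURCE A (Python) =====
-- def replace_zeros(arr):
--     rows = len(arr)
--     cols = len(arr[0])
--
--     def valid_one(i, j):
--         if i >= 0 and i < rows and j >= 0 and j < cols:
--             return arr[i][j] == '1'
--         return False
--
--     for i in range(rows):
--         for j in range(cols):
--             if arr[i][j] == '0':
--                 count = 0
--                 if valid_one(i-1, j):
--                     count += 1
--                 if valid_one(i+1, j):
--                     count += 1
--                 if valid_one(i, j-1):
--                     count += 1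
--                 if valid_one(i, j+1):
--                     count += 1
--                 if count >= 2:
--                     arr[i][j] = 'x'
--
--     return arr
-- ===== SOURCE B (Python) =====
-- def replace_zeros(arr):
--     # Scatter pass: each '1' cell increments a count grid at its in-bounds
--     # neighbors; then mark '0' cells with count >= 2. Mutates arr in place like A.
--     rows = len(arr)
--     cols = len(arr[0])
--     count = [[0] * cols for _ in range(rows)]
--     for i in range(rows):
--         for j in range(cols):
--             if arr[i][j] == '1':
--                 if i > 0:
--                     count[i - 1][j] += 1
--                 if i + 1 < rows:
--                     count[i + 1][j] += 1
--                 if j > 0: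
--                     count[i][j - 1] += 1
--                 if j + 1 < cols:
--                     count[i][j + 1] += 1
--     for i in range(rows):
--         for j in range(cols):
--             if arr[i][j] == '0' and count[i][j] >= 2:
--                 arr[i][j] = 'x'
--     return arr
-- ===== Notes on version B (the rewrite author's own statement) =====
-- stated objective: alternative
-- what changed: Replaces A's per-'0'-cell gather (a valid_one helper probing the four neighbors of each zero cell) with a scatter pass: one loop over all cells increments a separate rows*cols count grid at the in-bounds neighbors of every '1' cell, then a second loop marks '0' cells whose count is >= 2.
import Mathlib
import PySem

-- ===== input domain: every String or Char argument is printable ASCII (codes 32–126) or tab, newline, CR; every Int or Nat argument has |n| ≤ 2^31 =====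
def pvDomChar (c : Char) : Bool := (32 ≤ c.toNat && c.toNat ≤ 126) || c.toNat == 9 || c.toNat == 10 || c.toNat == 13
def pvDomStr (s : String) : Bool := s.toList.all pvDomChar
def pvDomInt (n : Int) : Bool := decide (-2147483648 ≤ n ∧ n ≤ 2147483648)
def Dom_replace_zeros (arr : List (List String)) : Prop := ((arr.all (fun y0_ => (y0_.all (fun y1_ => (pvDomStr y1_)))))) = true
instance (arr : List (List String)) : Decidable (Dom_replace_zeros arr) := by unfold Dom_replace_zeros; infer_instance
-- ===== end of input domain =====

-- B replaces A's per-'0'-cell neighbor gather with a scatter pass over '1' cells into a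
-- separate count grid plus a marking pass; equal return value (both mutate arr in place in Python).

-- ===== PORT A =====
-- valid_one closes over the (mutated) arr, so it takes the current grid g.
-- arr[i][j] is read via pyGetD: the bounds are checked just before, and Pre_ makes every
-- row at least cols long, so the default is never the value Python would have raised on.
def pvValidOne (arr : List (List String)) (rows cols : Int) (i j : Int) : Bool :=
  if 0 ≤ i && i < rows && 0 ≤ j && j < cols then
    PySem.List.pyGetD (PySem.List.pyGetD arr i []) j "" == "1"
  else
    false

def replace_zeros (arr : List (List String)) : List (List String) :=
  let rows : Int := arr.length
  let cols : Int := (PySem.List.pyGetD arr 0 []).length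
  (PySem.List.pyRange 0 rows 1).foldl (fun g i =>
    (PySem.List.pyRange 0 cols 1).foldl (fun g j =>
      if PySem.List.pyGetD (PySem.List.pyGetD g i []) j "" == "0" then
        let count : Int :=
          (if pvValidOne g rows cols (i-1) j then 1 else 0)
          + (if pvValidOne g rows cols (i+1) j then 1 else 0)
          + (if pvValidOne g rows cols i (j-1) then 1 else 0)
          + (if pvValidOne g rows cols i (j+1) then 1 else 0)
        if 2 ≤ count then
          PySem.List.pySetD g i (PySem.List.pySetD (PySem.List.pyGetD g i []) j "x")
        else g
      else g) g) arr

-- ===== PORT B =====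
-- count[i][j] += 1  (the repeated in-place increment statement of Source B)
def pvBump (c : List (List Int)) (i j : Int) : List (List Int) :=
  PySem.List.pySetD c i
    (PySem.List.pySetD (PySem.List.pyGetD c i []) j
      (PySem.List.pyGetD (PySem.List.pyGetD c i []) j 0 + 1))

-- the first (scatter) loop of Source B: build the count grid
def pvCountInt (arr : List (List String)) (rows cols : Int) : List (List Int) :=
  (PySem.List.pyRange 0 rows 1).foldl (fun c i =>
    (PySem.List.pyRange 0 cols 1).foldl (fun c j =>
      if PySem.List.pyGetD (PySem.List.pyGetD arr i []) j "" == "1" then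
        let c1 := if 0 < i then pvBump c (i-1) j else c
        let c2 := if i+1 < rows then pvBump c1 (i+1) j else c1
        let c3 := if 0 < j then pvBump c2 i (j-1) else c2
        if j+1 < cols then pvBump c3 i (j+1) else c3
      else c) c)
    ((PySem.List.pyRange 0 rows 1).map (fun _ => List.replicate cols.toNat 0))

def replace_zeros_alt (arr : List (List String)) : List (List String) :=
  let rows : Int := arr.length
  let cols : Int := (PySem.List.pyGetD arr 0 []).length
  let count : List (List Int) := pvCountInt arr rows cols
  (PySem.List.pyRange 0 rows 1).foldl (fun g i =>
    (PySem.List.pyRange 0 cols 1).foldl (fun g j =>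
      if (PySem.List.pyGetD (PySem.List.pyGetD g i []) j "" == "0")
          && (2 ≤ PySem.List.pyGetD (PySem.List.pyGetD count i []) j 0) then
        PySem.List.pySetD g i (PySem.List.pySetD (PySem.List.pyGetD g i []) j "x")
      else g) g) arr

-- ===== PRECONDITION & SPEC =====
-- Pre_ excludes exactly the inputs where Python A raises IndexError: the empty list
-- (arr[0]) and grids with a row shorter than the first row (arr[i][j] for j < cols).
def Pre_replace_zeros (arr : List (List String)) : Prop :=
  arr ≠ [] ∧ ∀ row ∈ arr, (arr.headD []).length ≤ row.length
instance (arr : List (List String)) : Decidable (Pre_replace_zeros arr) := by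
  unfold Pre_replace_zeros; infer_instance

def pvWitness_replace_zeros : List (List String) := [["0", "1"], ["1", "1"]]

def Spec_replace_zeros (arr : List (List String)) (out : List (List String)) : Prop := out = replace_zeros_alt arr
instance (arr : List (List String)) (out : List (List String)) : Decidable (Spec_replace_zeros arr out) := by unfold Spec_replace_zeros; infer_instance

-- ===== CLAIM (what is proved, stated in full; the proofs are below) =====
def Claim_equal_replace_zeros : Prop := ∀ (arr : List (List String)), Dom_replace_zeros arr → Pre_replace_zeros arr → Spec_replace_zeros arr (replace_zeros arr)

-- ===== LEMMAS AND PROOFS =====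

-- pointwise view of a grid and the single-cell update
def pvGet {A : Type} (d : A) (g : List (List A)) (i j : Nat) : A := (g.getD i []).getD j d

def pvSet {A : Type} (g : List (List A)) (i j : Nat) (v : A) : List (List A) :=
  g.set i ((g.getD i []).set j v)

-- bounds-checked "this cell is '1'" test (Nat form of valid_one at in-range Nat indices)
def pvOne (g : List (List String)) (rows cols : Nat) (i j : Nat) : Bool :=
  decide (i < rows) && decide (j < cols) && (pvGet "" g i j == "1")

-- the neighbor count of (i,j) read off the grid g
def pvNbr (g : List (List String)) (rows cols : Nat) (i j : Nat) : Int :=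
  (if decide (0 < i) && pvOne g rows cols (i-1) j then 1 else 0)
  + (if pvOne g rows cols (i+1) j then 1 else 0)
  + (if decide (0 < j) && pvOne g rows cols i (j-1) then 1 else 0)
  + (if pvOne g rows cols i (j+1) then 1 else 0)

-- Nat-normal form of A's loop body
def pvStepA (rows cols : Nat) (g : List (List String)) (i j : Nat) : List (List String) :=
  if pvGet "" g i j == "0" then
    (if 2 ≤ pvNbr g rows cols i j then pvSet g i j "x" else g)
  else g

-- the pure reference step both loops are reduced to: everything read from the ORIGINAL arr
def pvStepPure (arr : List (List String)) (rows cols : Nat) (g : List (List String)) (i j : Nat) : List (List String) :=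
  if pvGet "" arr i j == "0" && decide (2 ≤ pvNbr arr rows cols i j) then pvSet g i j "x" else g

def pvPure (arr : List (List String)) (rows cols : Nat) : List (List String) :=
  (List.range rows).foldl (fun g i =>
    (List.range cols).foldl (fun g j => pvStepPure arr rows cols g i j) g) arr

-- ---------- generic fold lemmas ----------

theorem pv_foldl_congr {A B : Type} (Inv : A → Prop) (f f' : A → B → A) (l : List B) (x : A)
    (hx : Inv x) (hstep : ∀ g y, y ∈ l → Inv g → f g y = f' g y)
    (hpres : ∀ g y, y ∈ l → Inv g → Inv (f' g y)) :
    l.foldl f x = l.foldl f' x := by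
  induction l generalizing x with
  | nil => rfl
  | cons y t ih =>
    simp only [List.foldl_cons]
    rw [hstep x y (by simp) hx]
    exact ih (f' x y) (hpres x y (by simp) hx)
      (fun g z hz => hstep g z (by simp [hz])) (fun g z hz => hpres g z (by simp [hz]))

theorem pv_foldl_inv {A B : Type} (Inv : A → Prop) (f : A → B → A) (l : List B) (x : A)
    (hx : Inv x) (hpres : ∀ g y, y ∈ l → Inv g → Inv (f g y)) :
    Inv (l.foldl f x) := by
  induction l generalizing x with
  | nil => exact hx
  | cons y t ih =>
    exact ih (f x y) (hpres x y (by simp) hx) (fun g z hz => hpres g z (by simp [hz]))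

theorem pv_foldl_measure {A B : Type} (Inv : A → Prop) (mu : A → Int) (w : B → Int)
    (s : A → B → A) (l : List B) (x : A) (hx : Inv x)
    (h : ∀ c y, y ∈ l → Inv c → Inv (s c y) ∧ mu (s c y) = mu c + w y) :
    mu (l.foldl s x) = mu x + (l.map w).sum := by
  induction l generalizing x with
  | nil => simp
  | cons y t ih =>
    have h1 := h x y (by simp) hx
    simp only [List.foldl_cons, List.map_cons, List.sum_cons]
    rw [ih (s x y) h1.1 (fun c z hz => h c z (by simp [hz])), h1.2]
    ring

theorem pv_sum_range_single (n : Nat) (f : Nat → Int) (k : Nat)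
    (h : ∀ x, x ≠ k → f x = 0) :
    ((List.range n).map f).sum = if k < n then f k else 0 := by
  induction n with
  | zero => simp
  | succ m ih =>
    rw [List.range_succ]
    simp only [List.map_append, List.sum_append, List.map_cons, List.map_nil, List.sum_cons,
      List.sum_nil, ih]
    by_cases hk : k = m
    · subst hk
      rw [if_neg (lt_irrefl k), if_pos (Nat.lt_succ_self k)]
      ring
    · rw [h m (by omega)]
      split_ifs <;> simp_all <;> omega

-- transport a fold over pyRange 0 n 1 to a fold over List.range n
theorem pv_foldl_range_cast {A : Type} (n : Nat) (f : A → Int → A) (f' : A → Nat → A) (x : A)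
    (h : ∀ c (k : Nat), f c (k : Int) = f' c k) :
    (PySem.List.pyRange 0 (n : Int) 1).foldl f x = (List.range n).foldl f' x := by
  rw [PySem.List.pyRange_one, List.foldl_map]
  have hn : ((n : Int) - 0).toNat = n := by omega
  rw [hn]
  congr 1
  funext c k
  rw [show (0 : Int) + (k : Int) = (k : Int) by ring, h]

-- ---------- pvGet / pvSet facts ----------

theorem pv_getD_set {A : Type} (l : List A) (n m : Nat) (a d : A) :
    (l.set n a).getD m d = if n = m ∧ n < l.length then a else l.getD m d := by
  by_cases h1 : n = m
  · subst h1
    by_cases h2 : n < l.length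
    · rw [if_pos ⟨rfl, h2⟩, List.getD_eq_getElem _ _ (by simpa using h2),
        List.getElem_set_self]
    · rw [if_neg (by tauto), List.set_eq_of_length_le (by omega)]
  · rw [if_neg (by tauto), List.getD_eq_getElem?_getD, List.getElem?_set_ne h1,
      ← List.getD_eq_getElem?_getD]

theorem pv_length_pvSet {A : Type} (g : List (List A)) (i j : Nat) (v : A) :
    (pvSet g i j v).length = g.length := by
  simp [pvSet]

theorem pv_rowlen_pvSet {A : Type} (g : List (List A)) (i j : Nat) (v : A) (i' : Nat) :
    ((pvSet g i j v).getD i' []).length = (g.getD i' []).length := by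
  unfold pvSet
  rw [pv_getD_set]
  split_ifs with h1
  · obtain ⟨rfl, -⟩ := h1
    simp
  · rfl

theorem pv_get_pvSet {A : Type} (d : A) (g : List (List A)) (i j : Nat) (v : A) (i' j' : Nat) :
    pvGet d (pvSet g i j v) i' j'
      = if i' = i ∧ j' = j ∧ i < g.length ∧ j < (g.getD i []).length then v
        else pvGet d g i' j' := by
  unfold pvGet pvSet
  rw [pv_getD_set]
  split_ifs with h1 h2 h2
  · obtain ⟨rfl, hlen⟩ := h1
    obtain ⟨-, rfl, -, hj⟩ := h2
    rw [pv_getD_set, if_pos ⟨rfl, hj⟩]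
  · obtain ⟨rfl, hlen⟩ := h1
    rw [pv_getD_set, if_neg (by tauto)]
  · exact absurd ⟨h2.1.symm, h2.2.2.1⟩ h1
  · rfl

theorem pv_pvSet_self {A : Type} (d : A) (g : List (List A)) (i j : Nat) (v : A)
    (hv : v ≠ d) (h : pvGet d g i j = v) : pvSet g i j v = g := by
  unfold pvGet at h
  have hi : i < g.length := by
    by_contra hi
    rw [List.getD_eq_default _ _ (by omega : g.length ≤ i)] at h
    simp at h
    exact hv h.symm
  have hj : j < (g.getD i []).length := by
    by_contra hj
    rw [List.getD_eq_default _ _ (by omega : (g.getD i []).length ≤ j)] at h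
    exact hv h.symm
  rw [List.getD_eq_getElem _ _ hj] at h
  unfold pvSet
  rw [← h, List.set_getElem_self hj, List.getD_eq_getElem _ _ hi, List.set_getElem_self hi]

-- ---------- the shared invariant: g differs from arr only by '0' cells turned 'x' ----------

def pvInv (arr g : List (List String)) : Prop :=
  g.length = arr.length
  ∧ (∀ i : Nat, (g.getD i []).length = (arr.getD i []).length)
  ∧ ∀ i j : Nat, pvGet "" g i j = pvGet "" arr i j
      ∨ (pvGet "" arr i j = "0" ∧ pvGet "" g i j = "x")

theorem pvInv_refl (arr : List (List String)) : pvInv arr arr :=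
  ⟨rfl, fun _ => rfl, fun _ _ => Or.inl rfl⟩

theorem pvInv_one (arr g : List (List String)) (h : pvInv arr g) (rows cols i j : Nat) :
    pvOne g rows cols i j = pvOne arr rows cols i j := by
  unfold pvOne
  rcases h.2.2 i j with h1 | ⟨h1, h2⟩
  · rw [h1]
  · rw [h1, h2]
    have e1 : ("x" == "1") = false := by decide
    have e2 : ("0" == "1") = false := by decide
    rw [e1, e2]

theorem pvInv_nbr (arr g : List (List String)) (h : pvInv arr g) (rows cols i j : Nat) :
    pvNbr g rows cols i j = pvNbr arr rows cols i j := by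
  unfold pvNbr
  rw [pvInv_one arr g h, pvInv_one arr g h, pvInv_one arr g h, pvInv_one arr g h]

theorem pvInv_pres (arr g : List (List String)) (rows cols i j : Nat) (h : pvInv arr g) :
    pvInv arr (pvStepPure arr rows cols g i j) := by
  unfold pvStepPure
  split_ifs with hc
  · refine ⟨by rw [pv_length_pvSet]; exact h.1,
      fun i' => by rw [pv_rowlen_pvSet]; exact h.2.1 i', ?_⟩
    intro i' j'
    rw [pv_get_pvSet]
    split_ifs with he
    · obtain ⟨rfl, rfl, -⟩ := he
      simp only [Bool.and_eq_true, beq_iff_eq] at hc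
      exact Or.inr ⟨hc.1, rfl⟩
    · exact h.2.2 i' j'
  · exact h

theorem pv_stepA_eq_pure (arr g : List (List String)) (rows cols i j : Nat) (h : pvInv arr g) :
    pvStepA rows cols g i j = pvStepPure arr rows cols g i j := by
  unfold pvStepA pvStepPure
  rw [pvInv_nbr arr g h]
  rcases h.2.2 i j with h1 | ⟨h1, h2⟩
  · rw [h1]
    by_cases hc : (pvGet "" arr i j == "0") = true
    · by_cases hn : (2 : Int) ≤ pvNbr arr rows cols i j
      · rw [if_pos hc, if_pos hn, if_pos (by simp [hc, hn])]
      · rw [if_pos hc, if_neg hn, if_neg (by simp [hn])]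
    · rw [if_neg hc, if_neg (by simp [hc])]
  · rw [h1, h2]
    have hx : ("x" == "0") = false := by decide
    rw [hx, if_neg (by simp)]
    by_cases hn : (2 : Int) ≤ pvNbr arr rows cols i j
    · rw [if_pos (by simp [hn])]
      exact (pv_pvSet_self "" g i j "x" (by decide) h2).symm
    · rw [if_neg (by simp [hn])]

-- ---------- A's loop equals the pure pass ----------

theorem pv_validOne_m1_left (g : List (List String)) (R C i j : Nat) :
    pvValidOne g (R : Int) (C : Int) ((i : Int) - 1) (j : Int)
      = (decide (0 < i) && pvOne g R C (i-1) j) := by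
  unfold pvValidOne pvOne
  by_cases hp : 0 < i
  · rw [show ((i : Int) - 1) = ((i - 1 : Nat) : Int) by omega]
    simp only [PySem.List.pyGetD_natCast, decide_eq_true hp, Bool.true_and, pvGet]
    split_ifs with h
    · simp only [Bool.and_eq_true, decide_eq_true_eq] at h
      rw [decide_eq_true (by omega : i - 1 < R), decide_eq_true (by omega : j < C)]
      simp
    · have hn : ¬ (i - 1 < R ∧ j < C) := by
        intro hc
        apply h
        simp only [Bool.and_eq_true, decide_eq_true_eq]
        omega
      by_cases hr : i - 1 < R
      · rw [decide_eq_true hr, decide_eq_false (by tauto)]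
        simp
      · rw [decide_eq_false hr]
        simp
  · have hi : i = 0 := by omega
    subst hi
    rw [if_neg (by simp), decide_eq_false hp]
    simp

theorem pv_validOne_p1_left (g : List (List String)) (R C i j : Nat) :
    pvValidOne g (R : Int) (C : Int) ((i : Int) + 1) (j : Int) = pvOne g R C (i+1) j := by
  unfold pvValidOne pvOne
  rw [show ((i : Int) + 1) = ((i + 1 : Nat) : Int) by omega]
  simp only [PySem.List.pyGetD_natCast, pvGet]
  split_ifs with h
  · simp only [Bool.and_eq_true, decide_eq_true_eq] at h
    rw [decide_eq_true (by omega : i + 1 < R), decide_eq_true (by omega : j < C)]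
    simp
  · have hn : ¬ (i + 1 < R ∧ j < C) := by
      intro hc
      apply h
      simp only [Bool.and_eq_true, decide_eq_true_eq]
      omega
    by_cases hr : i + 1 < R
    · rw [decide_eq_true hr, decide_eq_false (by tauto)]
      simp
    · rw [decide_eq_false hr]
      simp

theorem pv_validOne_m1_right (g : List (List String)) (R C i j : Nat) :
    pvValidOne g (R : Int) (C : Int) (i : Int) ((j : Int) - 1)
      = (decide (0 < j) && pvOne g R C i (j-1)) := by
  unfold pvValidOne pvOne
  by_cases hp : 0 < j
  · rw [show ((j : Int) - 1) = ((j - 1 : Nat) : Int) by omega]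
    simp only [PySem.List.pyGetD_natCast, decide_eq_true hp, Bool.true_and, pvGet]
    split_ifs with h
    · simp only [Bool.and_eq_true, decide_eq_true_eq] at h
      rw [decide_eq_true (by omega : i < R), decide_eq_true (by omega : j - 1 < C)]
      simp
    · have hn : ¬ (i < R ∧ j - 1 < C) := by
        intro hc
        apply h
        simp only [Bool.and_eq_true, decide_eq_true_eq]
        omega
      by_cases hr : i < R
      · rw [decide_eq_true hr, decide_eq_false (by tauto)]
        simp
      · rw [decide_eq_false hr]
        simp
  · have hj : j = 0 := by omega
    subst hj
    rw [if_neg (by simp), decide_eq_false hp]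
    simp

theorem pv_validOne_p1_right (g : List (List String)) (R C i j : Nat) :
    pvValidOne g (R : Int) (C : Int) (i : Int) ((j : Int) + 1) = pvOne g R C i (j+1) := by
  unfold pvValidOne pvOne
  rw [show ((j : Int) + 1) = ((j + 1 : Nat) : Int) by omega]
  simp only [PySem.List.pyGetD_natCast, pvGet]
  split_ifs with h
  · simp only [Bool.and_eq_true, decide_eq_true_eq] at h
    rw [decide_eq_true (by omega : i < R), decide_eq_true (by omega : j + 1 < C)]
    simp
  · have hn : ¬ (i < R ∧ j + 1 < C) := by
      intro hc
      apply h
      simp only [Bool.and_eq_true, decide_eq_true_eq]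
      omega
    by_cases hr : i < R
    · rw [decide_eq_true hr, decide_eq_false (by tauto)]
      simp
    · rw [decide_eq_false hr]
      simp

theorem pv_A_eq_stepA (arr : List (List String)) :
    replace_zeros arr
      = (List.range arr.length).foldl (fun g i =>
          (List.range (arr.getD 0 []).length).foldl
            (fun g j => pvStepA arr.length (arr.getD 0 []).length g i j) g) arr := by
  unfold replace_zeros
  simp only [PySem.List.pyGetD_zero]
  apply pv_foldl_range_cast
  intro g i
  apply pv_foldl_range_cast
  intro c j
  simp only [PySem.List.pyGetD_natCast, PySem.List.pySetD_natCast,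
    pv_validOne_m1_left, pv_validOne_p1_left, pv_validOne_m1_right, pv_validOne_p1_right]
  rfl

theorem pv_A_eq_pure (arr : List (List String)) :
    replace_zeros arr = pvPure arr arr.length (arr.getD 0 []).length := by
  rw [pv_A_eq_stepA]
  unfold pvPure
  apply pv_foldl_congr (pvInv arr) _ _ _ _ (pvInv_refl arr)
  · intro g i _ hg
    apply pv_foldl_congr (pvInv arr) _ _ _ _ hg
    · intro g' j _ hg'
      exact pv_stepA_eq_pure arr g' _ _ i j hg'
    · intro g' j _ hg'
      exact pvInv_pres arr g' _ _ i j hg'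
  · intro g i _ hg
    exact pv_foldl_inv (pvInv arr) _ _ _ hg (fun g' j _ hg' => pvInv_pres arr g' _ _ i j hg')

-- ---------- the scatter pass: Nat-normal form and its characterisation ----------

def pvBumpN (c : List (List Int)) (a b : Nat) : List (List Int) :=
  pvSet c a b (pvGet 0 c a b + 1)

def pvCondBump (P : Prop) [Decidable P] (c : List (List Int)) (a b : Nat) : List (List Int) :=
  if P then pvBumpN c a b else c

-- Nat-normal form of B's scatter body at source cell (p,q)
def pvScat (arr : List (List String)) (R C : Nat) (c : List (List Int)) (p q : Nat) :
    List (List Int) :=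
  if pvGet "" arr p q == "1" then
    pvCondBump (q+1 < C)
      (pvCondBump (0 < q)
        (pvCondBump (p+1 < R)
          (pvCondBump (0 < p) c (p-1) q)
          (p+1) q)
        p (q-1))
      p (q+1)
  else c

def pvShape (c : List (List Int)) (R C : Nat) : Prop :=
  c.length = R ∧ ∀ i : Nat, i < R → (c.getD i []).length = C

-- per-source contribution of cell (p,q) to the count at (i,j)
def pvContrib (arr : List (List String)) (R C : Nat) (i j p q : Nat) : Int :=
  if pvGet "" arr p q == "1" then
    (if 0 < p ∧ p - 1 = i ∧ q = j then 1 else 0)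
    + (if p+1 < R ∧ p+1 = i ∧ q = j then 1 else 0)
    + (if 0 < q ∧ p = i ∧ q - 1 = j then 1 else 0)
    + (if q+1 < C ∧ p = i ∧ q+1 = j then 1 else 0)
  else 0

theorem pv_shape_bump (c : List (List Int)) (R C a b : Nat) (hs : pvShape c R C) :
    pvShape (pvBumpN c a b) R C := by
  refine ⟨by rw [pvBumpN, pv_length_pvSet]; exact hs.1, fun i hi => ?_⟩
  rw [pvBumpN, pv_rowlen_pvSet]
  exact hs.2 i hi

theorem pv_cnt_bump (c : List (List Int)) (R C a b : Nat) (hs : pvShape c R C)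
    (ha : a < R) (hb : b < C) (i j : Nat) :
    pvGet 0 (pvBumpN c a b) i j = pvGet 0 c i j + (if a = i ∧ b = j then 1 else 0) := by
  unfold pvBumpN
  rw [pv_get_pvSet]
  by_cases h2 : a = i ∧ b = j
  · obtain ⟨rfl, rfl⟩ := h2
    rw [if_pos ⟨rfl, rfl, by rw [hs.1]; exact ha, by rw [hs.2 a ha]; exact hb⟩,
      if_pos ⟨rfl, rfl⟩]
  · rw [if_neg (by tauto), if_neg h2]
    ring

theorem pv_condBump (c : List (List Int)) (R C : Nat) (hs : pvShape c R C)
    (P : Prop) [Decidable P] (a b : Nat) (hab : P → a < R ∧ b < C) :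
    pvShape (pvCondBump P c a b) R C ∧
    ∀ i j : Nat, pvGet 0 (pvCondBump P c a b) i j
      = pvGet 0 c i j + (if P ∧ a = i ∧ b = j then 1 else 0) := by
  unfold pvCondBump
  by_cases hP : P
  · obtain ⟨ha, hb⟩ := hab hP
    rw [if_pos hP]
    refine ⟨pv_shape_bump c R C a b hs, fun i j => ?_⟩
    rw [pv_cnt_bump c R C a b hs ha hb]
    congr 1
    split_ifs <;> tauto
  · rw [if_neg hP]
    exact ⟨hs, fun i j => by rw [if_neg (by tauto)]; ring⟩

theorem pv_scat_step (arr : List (List String)) (R C : Nat) (c : List (List Int)) (p q : Nat)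
    (hs : pvShape c R C) (hp : p < R) (hq : q < C) :
    pvShape (pvScat arr R C c p q) R C ∧
    ∀ i j : Nat, pvGet 0 (pvScat arr R C c p q) i j
      = pvGet 0 c i j + pvContrib arr R C i j p q := by
  unfold pvScat pvContrib
  by_cases h1 : (pvGet "" arr p q == "1") = true
  · obtain ⟨s1, e1⟩ := pv_condBump c R C hs (0 < p) (p-1) q (fun _ => ⟨by omega, hq⟩)
    obtain ⟨s2, e2⟩ := pv_condBump _ R C s1 (p+1 < R) (p+1) q (fun h => ⟨h, hq⟩)
    obtain ⟨s3, e3⟩ := pv_condBump _ R C s2 (0 < q) p (q-1) (fun _ => ⟨hp, by omega⟩)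
    obtain ⟨s4, e4⟩ := pv_condBump _ R C s3 (q+1 < C) p (q+1) (fun h => ⟨hp, h⟩)
    constructor
    · rw [if_pos h1]
      exact s4
    · intro i j
      rw [if_pos h1, if_pos h1, e4, e3, e2, e1]
      ring
  · constructor
    · rw [if_neg h1]
      exact hs
    · intro i j
      rw [if_neg h1, if_neg h1]
      ring

-- the initial count grid
def pvZeros (R C : Nat) : List (List Int) := List.replicate R (List.replicate C 0)

theorem pv_shape_zeros (R C : Nat) : pvShape (pvZeros R C) R C := by
  refine ⟨by simp [pvZeros], fun i hi => ?_⟩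
  rw [pvZeros, List.getD_eq_getElem _ _ (by simpa using hi)]
  simp

theorem pv_cnt_zeros (R C i j : Nat) : pvGet 0 (pvZeros R C) i j = 0 := by
  unfold pvGet pvZeros
  by_cases hi : i < R
  · have hrow : (List.replicate R (List.replicate C (0:Int))).getD i [] = List.replicate C 0 := by
      rw [List.getD_eq_getElem _ _ (by simpa using hi)]
      simp
    rw [hrow]
    by_cases hj : j < C
    · rw [List.getD_eq_getElem _ _ (by simpa using hj)]
      simp
    · rw [List.getD_eq_default _ _ (by simpa using not_lt.mp hj)]
  · have hrow : (List.replicate R (List.replicate C (0:Int))).getD i [] = [] :=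
      List.getD_eq_default _ _ (by simpa using not_lt.mp hi)
    rw [hrow]
    rfl

def pvCountGrid (arr : List (List String)) (R C : Nat) : List (List Int) :=
  (List.range R).foldl (fun c p =>
    (List.range C).foldl (fun c q => pvScat arr R C c p q) c) (pvZeros R C)

theorem pv_cnt_count_sum (arr : List (List String)) (R C i j : Nat) :
    pvGet 0 (pvCountGrid arr R C) i j
      = ((List.range R).map (fun p =>
          ((List.range C).map (fun q => pvContrib arr R C i j p q)).sum)).sum := by
  unfold pvCountGrid
  have h := pv_foldl_measure (fun c => pvShape c R C) (fun c => pvGet 0 c i j)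
    (fun p => ((List.range C).map (fun q => pvContrib arr R C i j p q)).sum)
    (fun c p => (List.range C).foldl (fun c q => pvScat arr R C c p q) c)
    (List.range R) (pvZeros R C) (pv_shape_zeros R C) ?_
  · simpa [pv_cnt_zeros] using h
  · intro c p hp hc
    rw [List.mem_range] at hp
    constructor
    · exact pv_foldl_inv (fun c => pvShape c R C) _ _ _ hc
        (fun c' q hq hc' => (pv_scat_step arr R C c' p q hc' hp (List.mem_range.mp hq)).1)
    · exact pv_foldl_measure (fun c => pvShape c R C) (fun c => pvGet 0 c i j)
        (fun q => pvContrib arr R C i j p q) _ (List.range C) c hc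
        (fun c' q hq hc' =>
          ⟨(pv_scat_step arr R C c' p q hc' hp (List.mem_range.mp hq)).1,
           (pv_scat_step arr R C c' p q hc' hp (List.mem_range.mp hq)).2 i j⟩)

-- the double contribution sum is exactly the gathered neighbor count
set_option maxHeartbeats 2000000 in
theorem pv_sum_contrib (arr : List (List String)) (R C i j : Nat) (hi : i < R) (hj : j < C) :
    ((List.range R).map (fun p =>
        ((List.range C).map (fun q => pvContrib arr R C i j p q)).sum)).sum
      = pvNbr arr R C i j := by
  have hsplit : ∀ p q : Nat, pvContrib arr R C i j p q
      = (if pvGet "" arr p q == "1" ∧ 0 < p ∧ p - 1 = i ∧ q = j then 1 else 0)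
      + (if pvGet "" arr p q == "1" ∧ p+1 < R ∧ p+1 = i ∧ q = j then 1 else 0)
      + (if pvGet "" arr p q == "1" ∧ 0 < q ∧ p = i ∧ q - 1 = j then 1 else 0)
      + (if pvGet "" arr p q == "1" ∧ q+1 < C ∧ p = i ∧ q+1 = j then 1 else 0) := by
    intro p q
    unfold pvContrib
    by_cases h1 : (pvGet "" arr p q == "1") = true
    · rw [if_pos h1]
      congr 1
      · congr 1
        · congr 1 <;> · split_ifs <;> tauto
        · split_ifs <;> tauto
      · split_ifs <;> tauto
    · rw [if_neg h1]
      rw [if_neg (by tauto), if_neg (by tauto), if_neg (by tauto), if_neg (by tauto)]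
      ring
  -- a generic evaluator for one direction
  have dir : ∀ (P : Nat → Nat → Prop) (_ : ∀ p q, Decidable (P p q)) (p0 q0 : Nat),
      (∀ p q, P p q → p = p0 ∧ q = q0) →
      ((List.range R).map (fun p =>
        ((List.range C).map (fun q =>
          (if pvGet "" arr p q == "1" ∧ P p q then (1:Int) else 0))).sum)).sum
      = if p0 < R ∧ q0 < C ∧ (pvGet "" arr p0 q0 == "1") = true ∧ P p0 q0 then 1 else 0 := by
    intro P _ p0 q0 hP
    have hinner : ∀ p : Nat,
        ((List.range C).map (fun q =>
          (if pvGet "" arr p q == "1" ∧ P p q then (1:Int) else 0))).sum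
        = if q0 < C ∧ (pvGet "" arr p q0 == "1") = true ∧ P p q0 then 1 else 0 := by
      intro p
      rw [pv_sum_range_single C _ q0 (fun x hx => by
        rw [if_neg (fun hc => hx (hP p x hc.2).2)])]
      split_ifs <;> tauto
    simp only [hinner]
    rw [pv_sum_range_single R _ p0 (fun x hx => by
      rw [if_neg (fun hc => hx (hP x q0 hc.2.2).1)])]
    split_ifs <;> tauto
  calc ((List.range R).map (fun p =>
        ((List.range C).map (fun q => pvContrib arr R C i j p q)).sum)).sum
      = ((List.range R).map (fun p =>
          ((List.range C).map (fun q =>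
            (if pvGet "" arr p q == "1" ∧ 0 < p ∧ p - 1 = i ∧ q = j then (1:Int) else 0)
            + (if pvGet "" arr p q == "1" ∧ p+1 < R ∧ p+1 = i ∧ q = j then 1 else 0)
            + (if pvGet "" arr p q == "1" ∧ 0 < q ∧ p = i ∧ q - 1 = j then 1 else 0)
            + (if pvGet "" arr p q == "1" ∧ q+1 < C ∧ p = i ∧ q+1 = j then 1 else 0))).sum)).sum := by
        simp only [hsplit]
    _ = pvNbr arr R C i j := by
        simp only [List.sum_map_add]
        have d1 := dir (fun p q => 0 < p ∧ p - 1 = i ∧ q = j) (by infer_instance) (i+1) j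
          (fun p q h => by omega)
        have d2 := dir (fun p q => p+1 < R ∧ p+1 = i ∧ q = j) (by infer_instance) (i-1) j
          (fun p q h => by omega)
        have d3 := dir (fun p q => 0 < q ∧ p = i ∧ q - 1 = j) (by infer_instance) i (j+1)
          (fun p q h => by omega)
        have d4 := dir (fun p q => q+1 < C ∧ p = i ∧ q+1 = j) (by infer_instance) i (j-1)
          (fun p q h => by omega)
        simp only at d1 d2 d3 d4
        rw [d1, d2, d3, d4]
        have F1 : (if i+1 < R ∧ j < C ∧ (pvGet "" arr (i+1) j == "1") = true
              ∧ 0 < i+1 ∧ i+1-1 = i ∧ True then (1:Int) else 0)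
            = (if pvOne arr R C (i+1) j then (1:Int) else 0) := by
          unfold pvOne
          by_cases hb : i+1 < R <;> by_cases hg : (pvGet "" arr (i+1) j == "1") = true
          · rw [if_pos ⟨hb, hj, hg, by omega, by omega, trivial⟩,
              if_pos (by simp only [Bool.and_eq_true, decide_eq_true_eq]; exact ⟨⟨hb, hj⟩, hg⟩)]
          · rw [if_neg (by tauto),
              if_neg (by simp only [Bool.and_eq_true, decide_eq_true_eq]; tauto)]
          · rw [if_neg (by tauto),
              if_neg (by simp only [Bool.and_eq_true, decide_eq_true_eq]; tauto)]
          · rw [if_neg (by tauto),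
              if_neg (by simp only [Bool.and_eq_true, decide_eq_true_eq]; tauto)]
        have F2 : (if i-1 < R ∧ j < C ∧ (pvGet "" arr (i-1) j == "1") = true
              ∧ i-1+1 < R ∧ i-1+1 = i ∧ True then (1:Int) else 0)
            = (if decide (0 < i) && pvOne arr R C (i-1) j then (1:Int) else 0) := by
          unfold pvOne
          by_cases hi0 : 0 < i <;> by_cases hg : (pvGet "" arr (i-1) j == "1") = true
          · rw [if_pos ⟨by omega, hj, hg, by omega, by omega, trivial⟩,
              if_pos (by simp only [Bool.and_eq_true, decide_eq_true_eq]; exact ⟨hi0, ⟨by omega, hj⟩, hg⟩)]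
          · rw [if_neg (by tauto),
              if_neg (by simp only [Bool.and_eq_true, decide_eq_true_eq]; tauto)]
          · rw [if_neg (fun hc => absurd hc.2.2.2.2.1 (by omega)),
              if_neg (by simp only [Bool.and_eq_true, decide_eq_true_eq]; tauto)]
          · rw [if_neg (by tauto),
              if_neg (by simp only [Bool.and_eq_true, decide_eq_true_eq]; tauto)]
        have F3 : (if i < R ∧ j+1 < C ∧ (pvGet "" arr i (j+1) == "1") = true
              ∧ 0 < j+1 ∧ True ∧ j+1-1 = j then (1:Int) else 0)
            = (if pvOne arr R C i (j+1) then (1:Int) else 0) := by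
          unfold pvOne
          by_cases hb : j+1 < C <;> by_cases hg : (pvGet "" arr i (j+1) == "1") = true
          · rw [if_pos ⟨hi, hb, hg, by omega, trivial, by omega⟩,
              if_pos (by simp only [Bool.and_eq_true, decide_eq_true_eq]; exact ⟨⟨hi, hb⟩, hg⟩)]
          · rw [if_neg (by tauto),
              if_neg (by simp only [Bool.and_eq_true, decide_eq_true_eq]; tauto)]
          · rw [if_neg (by tauto),
              if_neg (by simp only [Bool.and_eq_true, decide_eq_true_eq]; tauto)]
          · rw [if_neg (by tauto),
              if_neg (by simp only [Bool.and_eq_true, decide_eq_true_eq]; tauto)]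
        have F4 : (if i < R ∧ j-1 < C ∧ (pvGet "" arr i (j-1) == "1") = true
              ∧ j-1+1 < C ∧ True ∧ j-1+1 = j then (1:Int) else 0)
            = (if decide (0 < j) && pvOne arr R C i (j-1) then (1:Int) else 0) := by
          unfold pvOne
          by_cases hj0 : 0 < j <;> by_cases hg : (pvGet "" arr i (j-1) == "1") = true
          · rw [if_pos ⟨hi, by omega, hg, by omega, trivial, by omega⟩,
              if_pos (by simp only [Bool.and_eq_true, decide_eq_true_eq]; exact ⟨hj0, ⟨hi, by omega⟩, hg⟩)]
          · rw [if_neg (by tauto),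
              if_neg (by simp only [Bool.and_eq_true, decide_eq_true_eq]; tauto)]
          · rw [if_neg (fun hc => absurd hc.2.2.2.2.2 (by omega)),
              if_neg (by simp only [Bool.and_eq_true, decide_eq_true_eq]; tauto)]
          · rw [if_neg (by tauto),
              if_neg (by simp only [Bool.and_eq_true, decide_eq_true_eq]; tauto)]
        rw [F1, F2, F3, F4]
        unfold pvNbr
        ring

theorem pv_cnt_count (arr : List (List String)) (R C i j : Nat) (hi : i < R) (hj : j < C) :
    pvGet 0 (pvCountGrid arr R C) i j = pvNbr arr R C i j := by
  rw [pv_cnt_count_sum, pv_sum_contrib arr R C i j hi hj]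

-- ---------- B's loops equal the pure pass ----------

theorem pv_bump_cast (c : List (List Int)) (a b : Nat) :
    pvBump c (a : Int) (b : Int) = pvBumpN c a b := by
  unfold pvBump pvBumpN pvSet pvGet
  simp only [PySem.List.pyGetD_natCast, PySem.List.pySetD_natCast]

theorem pv_scat_cast (arr : List (List String)) (R C : Nat) (c : List (List Int)) (p q : Nat) :
    (if PySem.List.pyGetD (PySem.List.pyGetD arr (p : Int) []) (q : Int) "" == "1" then
      let c1 := if (0:Int) < (p : Int) then pvBump c ((p : Int)-1) (q : Int) else c
      let c2 := if (p : Int) + 1 < (R : Int) then pvBump c1 ((p : Int)+1) (q : Int) else c1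
      let c3 := if (0:Int) < (q : Int) then pvBump c2 (p : Int) ((q : Int)-1) else c2
      if (q : Int) + 1 < (C : Int) then pvBump c3 (p : Int) ((q : Int)+1) else c3
    else c) = pvScat arr R C c p q := by
  unfold pvScat pvCondBump
  simp only [PySem.List.pyGetD_natCast]
  have E1 : ∀ x : List (List Int),
      (if (0:Int) < (p : Int) then pvBump x ((p : Int)-1) (q : Int) else x)
        = (if 0 < p then pvBumpN x (p-1) q else x) := by
    intro x
    by_cases hp : 0 < p
    · rw [if_pos (by omega : (0:Int) < (p : Int)), if_pos hp,
        show ((p : Int) - 1) = ((p - 1 : Nat) : Int) by omega, pv_bump_cast]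
    · rw [if_neg (by omega : ¬ (0:Int) < (p : Int)), if_neg hp]
  have E2 : ∀ x : List (List Int),
      (if (p : Int) + 1 < (R : Int) then pvBump x ((p : Int)+1) (q : Int) else x)
        = (if p + 1 < R then pvBumpN x (p+1) q else x) := by
    intro x
    by_cases hp : p + 1 < R
    · rw [if_pos (by omega : (p : Int) + 1 < (R : Int)), if_pos hp,
        show ((p : Int) + 1) = ((p + 1 : Nat) : Int) by omega, pv_bump_cast]
    · rw [if_neg (by omega : ¬ (p : Int) + 1 < (R : Int)), if_neg hp]
  have E3 : ∀ x : List (List Int),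
      (if (0:Int) < (q : Int) then pvBump x (p : Int) ((q : Int)-1) else x)
        = (if 0 < q then pvBumpN x p (q-1) else x) := by
    intro x
    by_cases hq : 0 < q
    · rw [if_pos (by omega : (0:Int) < (q : Int)), if_pos hq,
        show ((q : Int) - 1) = ((q - 1 : Nat) : Int) by omega, pv_bump_cast]
    · rw [if_neg (by omega : ¬ (0:Int) < (q : Int)), if_neg hq]
  have E4 : ∀ x : List (List Int),
      (if (q : Int) + 1 < (C : Int) then pvBump x (p : Int) ((q : Int)+1) else x)
        = (if q + 1 < C then pvBumpN x p (q+1) else x) := by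
    intro x
    by_cases hq : q + 1 < C
    · rw [if_pos (by omega : (q : Int) + 1 < (C : Int)), if_pos hq,
        show ((q : Int) + 1) = ((q + 1 : Nat) : Int) by omega, pv_bump_cast]
    · rw [if_neg (by omega : ¬ (q : Int) + 1 < (C : Int)), if_neg hq]
  simp only [E1, E2, E3, E4]
  rfl

theorem pv_B_count_eq (arr : List (List String)) (R C : Nat) :
    pvCountInt arr (R : Int) (C : Int) = pvCountGrid arr R C := by
  unfold pvCountInt pvCountGrid
  have hzero : ((PySem.List.pyRange 0 (R : Int) 1).map
      (fun _ => List.replicate ((C : Int)).toNat (0:Int))) = pvZeros R C := by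
    rw [PySem.List.pyRange_one]
    simp [pvZeros, Function.comp_def, List.map_const']
  rw [hzero]
  apply pv_foldl_range_cast
  intro c p
  apply pv_foldl_range_cast
  intro c' q
  exact pv_scat_cast arr R C c' p q

theorem pv_stepB_eq_pure (arr g : List (List String)) (R C i j : Nat) (h : pvInv arr g)
    (hi : i < R) (hj : j < C) :
    (if (pvGet "" g i j == "0") && decide (2 ≤ pvGet 0 (pvCountGrid arr R C) i j)
      then pvSet g i j "x" else g)
    = pvStepPure arr R C g i j := by
  unfold pvStepPure
  rw [pv_cnt_count arr R C i j hi hj]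
  rcases h.2.2 i j with h1 | ⟨h1, h2⟩
  · rw [h1]
  · rw [h1, h2]
    have hx : ("x" == "0") = false := by decide
    rw [hx, if_neg (by simp)]
    by_cases hn : (2 : Int) ≤ pvNbr arr R C i j
    · rw [if_pos (by simp [hn])]
      exact (pv_pvSet_self "" g i j "x" (by decide) h2).symm
    · rw [if_neg (by simp [hn])]

theorem pv_B_mark_eq (arr : List (List String)) (CNT : List (List Int)) :
    (PySem.List.pyRange 0 ((arr.length : Nat) : Int) 1).foldl (fun g i =>
      (PySem.List.pyRange 0 (((arr.getD 0 []).length : Nat) : Int) 1).foldl (fun g j =>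
        if (PySem.List.pyGetD (PySem.List.pyGetD g i []) j "" == "0")
            && (2 ≤ PySem.List.pyGetD (PySem.List.pyGetD CNT i []) j 0) then
          PySem.List.pySetD g i (PySem.List.pySetD (PySem.List.pyGetD g i []) j "x")
        else g) g) arr
    = (List.range arr.length).foldl (fun g i =>
        (List.range (arr.getD 0 []).length).foldl (fun g j =>
          if (pvGet "" g i j == "0") && decide (2 ≤ pvGet 0 CNT i j)
            then pvSet g i j "x" else g) g) arr := by
  apply pv_foldl_range_cast
  intro g i
  apply pv_foldl_range_cast
  intro g' j
  simp only [PySem.List.pyGetD_natCast, PySem.List.pySetD_natCast]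
  rfl

theorem pv_B_eq_pure (arr : List (List String)) :
    replace_zeros_alt arr = pvPure arr arr.length (arr.getD 0 []).length := by
  unfold replace_zeros_alt
  simp only [PySem.List.pyGetD_zero]
  rw [pv_B_count_eq arr arr.length (arr.getD 0 []).length, pv_B_mark_eq]
  unfold pvPure
  apply pv_foldl_congr (pvInv arr) _ _ _ _ (pvInv_refl arr)
  · intro g i hi hg
    apply pv_foldl_congr (pvInv arr) _ _ _ _ hg
    · intro g' j hj hg'
      exact pv_stepB_eq_pure arr g' _ _ i j hg' (List.mem_range.mp hi) (List.mem_range.mp hj)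
    · intro g' j _ hg'
      exact pvInv_pres arr g' _ _ i j hg'
  · intro g i _ hg
    exact pv_foldl_inv (pvInv arr) _ _ _ hg (fun g' j _ hg' => pvInv_pres arr g' _ _ i j hg')

-- ===== VERDICT (by name: the statement is the Claim_ definition above) =====
theorem replace_zeros_spec : Claim_equal_replace_zeros := by
  intro arr _ _
  unfold Spec_replace_zeros
  rw [pv_A_eq_pure, pv_B_eq_pure]
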